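-- pv_equiv track=rewrite | github.com/nothingct/BOJ-CT-EX | 연습/순열/단어수학/단어수학.py | calc
-- ===== SOURCE A (Python) =====
-- def calc(a,letters,perm):
--   m = len(letters)
--   alpha=dict()
--   ans=0
--   for i in range(m):
--     alpha[letters[i]] = perm[i]
--   for s in a:
--     now = 0
--     for x in s:
--       now = now*10 + alpha[x]
--     ans+=now
--   return ans
-- ===== SOURCE B (Python) =====
-- def calc(a, letters, perm):
--     alpha = {}
--     for i in range(len(letters)):
--         alpha[letters[i]] = perm[i]
--     coeff = {}
--     for s in a:
--         w = 1
--         for x in reversed(s):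
--             coeff[x] = coeff.get(x, 0) + w
--             w *= 10
--     return sum(alpha[c] * w for c, w in coeff.items())
-- ===== Notes on version B (the rewrite author's own statement) =====
-- stated objective: alternative
-- what changed: Per-word Horner evaluation is replaced by a letter-keyed coefficient table: one pass accumulates each letter's total positional weight (powers of 10), and the answer is a single dot product alpha[c]*coeff[c] over the table.
import Mathlib
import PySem

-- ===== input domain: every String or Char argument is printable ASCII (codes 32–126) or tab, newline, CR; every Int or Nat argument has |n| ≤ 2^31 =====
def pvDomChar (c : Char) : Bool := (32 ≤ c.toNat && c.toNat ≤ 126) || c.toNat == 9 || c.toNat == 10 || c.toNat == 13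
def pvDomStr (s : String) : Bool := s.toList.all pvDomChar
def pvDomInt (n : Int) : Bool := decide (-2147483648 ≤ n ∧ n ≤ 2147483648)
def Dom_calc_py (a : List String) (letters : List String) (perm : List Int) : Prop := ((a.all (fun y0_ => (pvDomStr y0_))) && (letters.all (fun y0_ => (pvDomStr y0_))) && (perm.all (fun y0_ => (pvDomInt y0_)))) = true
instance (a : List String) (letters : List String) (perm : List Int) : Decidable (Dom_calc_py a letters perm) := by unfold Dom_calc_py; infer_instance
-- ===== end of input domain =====

-- B replaces A's per-word Horner evaluation by a letter-keyed coefficient (positional-weight) table; alternative decomposition, same cost.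

-- ===== PORT A =====
def calc_py (a : List String) (letters : List String) (perm : List Int) : Int :=
  let m : Int := (letters.length : Int)
  let alpha : PySem.Dict String Int :=
    (PySem.List.pyRange 0 m 1).foldl
      (fun d i => d.insert (PySem.List.pyGetD letters i "") (PySem.List.pyGetD perm i 0))
      PySem.Dict.empty
  a.foldl
    (fun ans s =>
      ans + s.toList.foldl (fun now x => now * 10 + alpha.getD (String.ofList [x]) 0) 0)
    0

-- ===== PORT B =====
def calc_py_alt (a : List String) (letters : List String) (perm : List Int) : Int :=
  let alpha : PySem.Dict String Int :=
    (PySem.List.pyRange 0 (letters.length : Int) 1).foldl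
      (fun d i => d.insert (PySem.List.pyGetD letters i "") (PySem.List.pyGetD perm i 0))
      PySem.Dict.empty
  let coeff : PySem.Dict String Int :=
    a.foldl
      (fun d s =>
        (s.toList.reverse.foldl
          (fun (p : PySem.Dict String Int × Int) x =>
            (p.1.insert (String.ofList [x]) (p.1.getD (String.ofList [x]) 0 + p.2), p.2 * 10))
          (d, 1)).1)
      PySem.Dict.empty
  (coeff.items.map (fun p => alpha.getD p.1 0 * p.2)).sum

-- ===== PRECONDITION & SPEC =====
-- Pre_ excludes exactly the inputs where the Python A raises: IndexError when perm is
-- shorter than letters, and KeyError when a word contains a character not listed in letters.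
def Pre_calc_py (a : List String) (letters : List String) (perm : List Int) : Prop :=
  letters.length ≤ perm.length ∧
    (a.all (fun s => s.toList.all (fun c => letters.contains (String.ofList [c])))) = true
instance (a : List String) (letters : List String) (perm : List Int) : Decidable (Pre_calc_py a letters perm) := by unfold Pre_calc_py; infer_instance

def pvWitness_calc_py : List String × List String × List Int := (["A"], ["A"], [1])

def Spec_calc_py (a : List String) (letters : List String) (perm : List Int) (out : Int) : Prop := out = calc_py_alt a letters perm
instance (a : List String) (letters : List String) (perm : List Int) (out : Int) : Decidable (Spec_calc_py a letters perm out) := by unfold Spec_calc_py; infer_instance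

-- ===== CLAIM (what is proved, stated in full; the proofs are below) =====
def Claim_equal_calc_py : Prop := ∀ (a : List String) (letters : List String) (perm : List Int), Dom_calc_py a letters perm → Pre_calc_py a letters perm → Spec_calc_py a letters perm (calc_py a letters perm)

-- ===== LEMMAS AND PROOFS =====

-- the insert-accumulate step both B loops use, over an occurrence list of (letter, weight) pairs
def pvStep (d : PySem.Dict String Int) (p : String × Int) : PySem.Dict String Int :=
  d.insert p.1 (d.getD p.1 0 + p.2)

-- the (letter, positional weight) occurrence pairs of one reversed word, weights w, w*10, …
def pvWpairs : List Char → Int → List (String × Int)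
  | [], _ => []
  | c :: t, w => (String.ofList [c], w) :: pvWpairs t (w * 10)

lemma pvWpairs_append (l : List Char) (c : Char) (w : Int) :
    pvWpairs (l ++ [c]) w = pvWpairs l w ++ [(String.ofList [c], w * 10 ^ l.length)] := by
  induction l generalizing w with
  | nil => simp [pvWpairs]
  | cons x t ih => simp [pvWpairs, ih, pow_succ]; ring_nf

-- final value of one lookup in the accumulate fold
lemma pvGetD_foldl_step (L : List (String × Int)) (d : PySem.Dict String Int) (c : String) :
    (L.foldl pvStep d).getD c 0
      = d.getD c 0 + ((L.filter (fun p => p.1 = c)).map (·.2)).sum := by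
  induction L generalizing d with
  | nil => simp
  | cons p t ih =>
      simp only [List.foldl_cons, ih, pvStep, List.filter_cons]
      by_cases h : p.1 = c
      · subst h; rw [PySem.Dict.getD_insert, if_pos rfl]; simp; ring
      · rw [PySem.Dict.getD_insert, if_neg (fun he => h he.symm)]; simp [h]

-- sum of f c * (w if c is the key, else 0) over a nodup list containing the key
lemma pvSumIte (f : String → Int) (w : Int) :
    ∀ (K : List String) (k : String), K.Nodup → k ∈ K →
      (K.map (fun c => f c * (if k = c then w else 0))).sum = f k * w := by
  intro K
  induction K with
  | nil => intro k _ hk; simp at hk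
  | cons x K' ih =>
      intro k hnd hk
      rcases List.mem_cons.mp hk with h | h
      · subst h
        have hnot : k ∉ K' := (List.nodup_cons.mp hnd).1
        have hz : (K'.map (fun c => f c * (if k = c then w else 0))).sum = 0 := by
          apply List.sum_eq_zero; intro y hy
          rw [List.mem_map] at hy; obtain ⟨c, hc, rfl⟩ := hy
          have hkc : ¬ k = c := fun he => hnot (by rw [he]; exact hc)
          rw [if_neg hkc]; ring
        rw [List.map_cons, List.sum_cons, if_pos rfl, hz, add_zero]
      · have hne : ¬ k = x := fun he => (List.nodup_cons.mp hnd).1 (by rw [← he]; exact h)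
        rw [List.map_cons, List.sum_cons, if_neg hne, ih k (List.nodup_cons.mp hnd).2 h]
        ring

-- grouping: summing f c * (grouped weight of c) over any nodup key cover equals the flat sum
lemma pvGrouping (f : String → Int) (K : List String) (L : List (String × Int))
    (hnd : K.Nodup) (hcov : ∀ p ∈ L, p.1 ∈ K) :
    (K.map (fun c => f c * ((L.filter (fun p => p.1 = c)).map (·.2)).sum)).sum
      = (L.map (fun p => f p.1 * p.2)).sum := by
  induction L with
  | nil => simp
  | cons p t ih =>
      have hp : p.1 ∈ K := hcov p (List.mem_cons_self ..)
      have hcov' : ∀ q ∈ t, q.1 ∈ K := fun q hq => hcov q (List.mem_cons_of_mem _ hq)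
      calc (K.map (fun c => f c * (((p :: t).filter (fun q => q.1 = c)).map (·.2)).sum)).sum
          = (K.map (fun c => f c * (if p.1 = c then p.2 else 0)
              + f c * ((t.filter (fun q => q.1 = c)).map (·.2)).sum)).sum := by
            apply congrArg; apply List.map_congr_left; intro c _
            by_cases h : p.1 = c
            · simp [h]; ring
            · simp [h]
        _ = (K.map (fun c => f c * (if p.1 = c then p.2 else 0))).sum
              + (K.map (fun c => f c * ((t.filter (fun q => q.1 = c)).map (·.2)).sum)).sum := by
            rw [← List.sum_map_add]
        _ = f p.1 * p.2 + (t.map (fun q => f q.1 * q.2)).sum := by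
            rw [pvSumIte f p.2 K p.1 hnd hp, ih hcov']
        _ = ((p :: t).map (fun q => f q.1 * q.2)).sum := by simp

-- B's inner loop over a reversed word is the accumulate fold over its occurrence pairs
lemma pvInner (cs : List Char) (d : PySem.Dict String Int) (w : Int) :
    cs.foldl
      (fun (p : PySem.Dict String Int × Int) x =>
        (p.1.insert (String.ofList [x]) (p.1.getD (String.ofList [x]) 0 + p.2), p.2 * 10))
      (d, w)
      = ((pvWpairs cs w).foldl pvStep d, w * 10 ^ cs.length) := by
  induction cs generalizing d w with
  | nil => simp [pvWpairs]
  | cons c t ih => simp [pvWpairs, ih, pvStep, pow_succ]; ring_nf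

-- A's Horner loop over a word is the weighted sum of its occurrence pairs
lemma pvHorner (f : String → Int) (cs : List Char) (acc : Int) :
    cs.foldl (fun now x => now * 10 + f (String.ofList [x])) acc
      = acc * 10 ^ cs.length + ((pvWpairs cs.reverse 1).map (fun p => f p.1 * p.2)).sum := by
  induction cs generalizing acc with
  | nil => simp [pvWpairs]
  | cons c t ih =>
      simp only [List.foldl_cons, ih, List.reverse_cons, pvWpairs_append, List.map_append,
        List.sum_append, List.length_cons, List.length_reverse, List.map_cons, List.map_nil,
        List.sum_cons, List.sum_nil, pow_succ]
      ring

-- folding the accumulate step word by word = folding it over the concatenation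
lemma pvFoldFlat (g : String → List (String × Int)) (t : List String) (d : PySem.Dict String Int) :
    t.foldl (fun d s => (g s).foldl pvStep d) d = (t.flatMap g).foldl pvStep d := by
  induction t generalizing d with
  | nil => simp
  | cons s t ih => simp only [List.foldl_cons, List.flatMap_cons, List.foldl_append]; exact ih _

-- B's outer loop builds the accumulate fold over the concatenation of all occurrence pairs
lemma pvOuter (a : List String) (d : PySem.Dict String Int) :
    a.foldl
      (fun d s =>
        (s.toList.reverse.foldl
          (fun (p : PySem.Dict String Int × Int) x =>
            (p.1.insert (String.ofList [x]) (p.1.getD (String.ofList [x]) 0 + p.2), p.2 * 10))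
          (d, 1)).1)
      d
      = (a.flatMap (fun s => pvWpairs s.toList.reverse 1)).foldl pvStep d := by
  have h := pvFoldFlat (fun s => pvWpairs s.toList.reverse 1) a d
  simp only [pvInner]
  exact h

-- the keys of the accumulate fold from empty: nodup and covering every occurrence key
lemma pvKeys_cover (L : List (String × Int)) :
    (L.foldl pvStep PySem.Dict.empty).keys.Nodup
      ∧ ∀ p ∈ L, p.1 ∈ (L.foldl pvStep PySem.Dict.empty).keys := by
  constructor
  · exact PySem.Dict.nodup_keys_foldl_insert_key L (fun p => p.1)
      (fun d p => d.getD p.1 0 + p.2) PySem.Dict.empty (by simp)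
  · intro p hp
    have h := PySem.Dict.keys_foldl_insert_key (l := L) (key := fun p => p.1)
      (f := fun d p => d.getD p.1 0 + p.2) (d := PySem.Dict.empty)
    rw [show (fun d (p : String × Int) => d.insert p.1 (d.getD p.1 0 + p.2)) = pvStep from rfl] at h
    rw [h]
    have hm : p.1 ∈ L.map (fun q => q.1) := List.mem_map_of_mem hp
    exact (PySem.Set.mem_update _ _ _).mpr (Or.inr hm)

-- weighted items sum of the accumulate-fold dict = flat weighted sum over the occurrences
lemma pvWsum (f : String → Int) (L : List (String × Int)) :
    (((L.foldl pvStep PySem.Dict.empty).items).map (fun p => f p.1 * p.2)).sum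
      = (L.map (fun p => f p.1 * p.2)).sum := by
  obtain ⟨hnd, hcov⟩ := pvKeys_cover L
  rw [PySem.Dict.items_eq_map_keys _ hnd 0, List.map_map]
  have : ((L.foldl pvStep PySem.Dict.empty).keys.map
      (fun c => f c * ((L.filter (fun p => p.1 = c)).map (·.2)).sum)).sum
      = (L.map (fun p => f p.1 * p.2)).sum :=
    pvGrouping f _ L hnd hcov
  rw [← this]
  apply congrArg; apply List.map_congr_left; intro c _
  simp [Function.comp, pvGetD_foldl_step]

-- ===== VERDICT (by name: the statement is the Claim_ definition above) =====
lemma pvTotal (f : String → Int) (a : List String) (i : Int) :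
    a.foldl (fun ans s => ans + s.toList.foldl (fun now x => now * 10 + f (String.ofList [x])) 0) i
      = i + ((a.flatMap (fun s => pvWpairs s.toList.reverse 1)).map (fun p => f p.1 * p.2)).sum := by
  induction a generalizing i with
  | nil => simp
  | cons s t ih =>
      simp only [List.foldl_cons, ih, List.flatMap_cons, List.map_append, List.sum_append]
      rw [pvHorner]
      ring

-- ===== VERDICT (by name: the statement is the Claim_ definition above) =====
theorem calc_py_spec : Claim_equal_calc_py := by
  intro a letters perm _ _
  unfold Spec_calc_py calc_py calc_py_alt
  dsimp only
  rw [pvOuter,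
    pvWsum (fun k => (List.foldl
      (fun d i => d.insert (PySem.List.pyGetD letters i "") (PySem.List.pyGetD perm i 0))
      PySem.Dict.empty (PySem.List.pyRange 0 (letters.length : Int) 1)).getD k 0),
    pvTotal (fun k => (List.foldl
      (fun d i => d.insert (PySem.List.pyGetD letters i "") (PySem.List.pyGetD perm i 0))
      PySem.Dict.empty (PySem.List.pyRange 0 (letters.length : Int) 1)).getD k 0)]
  ring
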